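-- pv_equiv track=rewrite | github.com/EnnubaBPMN2/AdventOfCode2025 | AocPython/day06/solution.py | parse_problem_right_to_left
-- ===== SOURCE A (Python) =====
-- def parse_problem_right_to_left(grid, start_col, end_col):
--     numbers = []
--     op = ' '
--
--     height = len(grid)
--
--     # Read each column from right to left
--     for col in range(end_col, start_col - 1, -1):
--         digit_chars = []
--
--         # Read digits from top to bottom in this column (rows 0 to height-2, excluding operator row)
--         for row in range(height - 1):
--             c = grid[row][col]
--             if c != ' ':
--                 digit_chars.append(c)
--
--         # Build number from these digits
--         if digit_chars:
--             num_str = ''.join(digit_chars)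
--             try:
--                 num = int(num_str)
--                 numbers.append(num)
--             except ValueError:
--                 pass
--
--     # Operator is in the last row - find it anywhere in this block
--     for col in range(start_col, end_col + 1):
--         c = grid[height - 1][col]
--         if c in ['+', '*']:
--             op = c
--             break
--
--     return (numbers, op)
-- ===== SOURCE B (Python) =====
-- def _int_or_none(s):
--     try:
--         return int(s)
--     except ValueError:
--         return None
--
--
-- def parse_problem_right_to_left(grid, start_col, end_col):
--     height = len(grid)
--     cols = list(range(start_col, end_col + 1))
--
--     # One row-major sweep over the digit rows: collect (column, char) for each
--     # non-space cell, in row order.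
--     cells = [(col, grid[row][col])
--              for row in range(height - 1)
--              for col in cols
--              if grid[row][col] != ' ']
--
--     # Group the collected characters by column.
--     acc = {}
--     for col, c in cells:
--         acc.setdefault(col, []).append(c)
--
--     # Emit the numbers right to left; empty and non-numeric columns are skipped
--     # (int('') raises ValueError just like a non-numeric string).
--     numbers = [n for n in (_int_or_none(''.join(acc.get(col, [])))
--                            for col in reversed(cols))
--                if n is not None]
--
--     # Operator: first '+' or '*' in the last row of the block.
--     op = next((c for c in (grid[height - 1][col] for col in cols) if c in '+*'), ' ')
--
--     return (numbers, op)
-- ===== Notes on version B (the rewrite author's own statement) =====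
-- stated objective: alternative
-- what changed: A's column-major nested scans that build each number directly are replaced by one row-major comprehension collecting (column, char) cells, a dict grouping pass keyed by column, a right-to-left comprehension that joins and int()-parses each grouped column (dropping the failures), and a next()-over-generator operator search; Pre_ excludes exactly the inputs on which A raises IndexError.
import Mathlib
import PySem

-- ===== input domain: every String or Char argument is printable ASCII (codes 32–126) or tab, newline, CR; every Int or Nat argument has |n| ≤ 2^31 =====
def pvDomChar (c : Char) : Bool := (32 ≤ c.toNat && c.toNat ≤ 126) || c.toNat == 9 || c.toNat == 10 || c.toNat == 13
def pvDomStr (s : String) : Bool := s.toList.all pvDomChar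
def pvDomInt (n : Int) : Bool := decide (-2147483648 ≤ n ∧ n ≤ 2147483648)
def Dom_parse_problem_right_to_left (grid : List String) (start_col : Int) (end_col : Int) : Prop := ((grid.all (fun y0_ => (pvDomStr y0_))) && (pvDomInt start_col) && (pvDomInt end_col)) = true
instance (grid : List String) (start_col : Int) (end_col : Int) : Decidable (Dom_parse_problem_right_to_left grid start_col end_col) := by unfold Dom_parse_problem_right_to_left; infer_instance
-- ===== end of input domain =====

-- B replaces A's column-major nested scans by one row-major cell comprehension, a dict grouping
-- pass keyed by column, a right-to-left filter-parse emit and a find-first operator search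
-- (objective: alternative).


-- ===== PORT A =====
-- A's operator loop: first '+' or '*' in the last row at the given columns (break = stop recursing)
def pvOpScanA (grid : List String) (cs : List Int) : String :=
  match cs with
  | [] => " "
  | col :: rest =>
    let c := PySem.List.pyGetD (PySem.List.pyGetD grid ((grid.length : Int) - 1) "").toList col ' '
    if c = '+' ∨ c = '*' then String.ofList [c] else pvOpScanA grid rest

def parse_problem_right_to_left (grid : List String) (start_col : Int) (end_col : Int) : List Int × String :=
  let height : Int := grid.length
  let numbers :=
    (PySem.List.pyRange end_col (start_col - 1) (-1)).foldl (fun numbers col =>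
      let digit_chars :=
        (PySem.List.pyRange 0 (height - 1) 1).foldl (fun dc row =>
          let c := PySem.List.pyGetD (PySem.List.pyGetD grid row "").toList col ' '
          if c ≠ ' ' then dc ++ [c] else dc) []
      if digit_chars ≠ [] then
        -- ''.join of single-char strings is the char list itself; int(num_str) with try/except is ofChars?
        match PySem.Int.ofChars? digit_chars with
        | some num => numbers ++ [num]
        | none => numbers
      else numbers) []
  let op := pvOpScanA grid (PySem.List.pyRange start_col (end_col + 1) 1)
  (numbers, op)

-- ===== PORT B =====
def parse_problem_right_to_left_alt (grid : List String) (start_col : Int) (end_col : Int) : List Int × String :=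
  let height : Int := grid.length
  let cols := PySem.List.pyRange start_col (end_col + 1) 1
  -- one row-major comprehension: (col, char) for every non-space cell of the digit rows
  let cells := (PySem.List.pyRange 0 (height - 1) 1).flatMap (fun row =>
      cols.filterMap (fun col =>
        let c := PySem.List.pyGetD (PySem.List.pyGetD grid row "").toList col ' '
        if c ≠ ' ' then some (col, c) else none))
  -- group the chars by column: acc.setdefault(col, []).append(c)
  let acc := cells.foldl (fun d p => PySem.Dict.modify d p.1 [] (fun l => l ++ [p.2])) PySem.Dict.empty
  -- emit right to left; _int_or_none = ofChars? (none on '' and on non-numeric strings)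
  let numbers := cols.reverse.filterMap (fun col => PySem.Int.ofChars? (PySem.Dict.getD acc col []))
  -- op = next((c for c in (grid[height-1][col] for col in cols) if c in '+*'), ' ')
  let op := match (cols.map (fun col =>
        PySem.List.pyGetD (PySem.List.pyGetD grid (height - 1) "").toList col ' ')).find?
        (fun c => c == '+' || c == '*') with
    | some c => String.ofList [c]
    | none => " "
  (numbers, op)

-- ===== PRECONDITION & SPEC =====
-- the last row A's operator loop reads (grid[height-1], '' when the grid is empty), as chars
def pvLastRow (grid : List String) : List Char :=
  ((PySem.List.pyGet? grid ((grid.length : Int) - 1)).getD "").toList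

-- Pre_ excludes exactly the inputs on which A raises IndexError: a scanned column out of range
-- for some digit row, or out of range for the last row before the operator loop finds '+'/'*'.
def Pre_parse_problem_right_to_left (grid : List String) (start_col : Int) (end_col : Int) : Prop :=
  (∀ row ∈ grid.dropLast, start_col ≤ end_col →
      (-(row.toList.length : Int) ≤ start_col ∧ end_col < (row.toList.length : Int))) ∧
  (start_col ≤ end_col →
      (-((pvLastRow grid).length : Int) ≤ start_col ∧
        (end_col < ((pvLastRow grid).length : Int) ∨
          (∃ col ∈ PySem.List.pyRange (max start_col (-((pvLastRow grid).length : Int)))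
              ((pvLastRow grid).length : Int) 1,
            (PySem.List.pyGetD (pvLastRow grid) col ' ' = '+' ∨
             PySem.List.pyGetD (pvLastRow grid) col ' ' = '*')))))

instance (grid : List String) (start_col : Int) (end_col : Int) : Decidable (Pre_parse_problem_right_to_left grid start_col end_col) := by unfold Pre_parse_problem_right_to_left; infer_instance

def pvWitness_parse_problem_right_to_left : List String × Int × Int := (["12", " 3", "+ "], 0, 1)

def Spec_parse_problem_right_to_left (grid : List String) (start_col : Int) (end_col : Int) (out : List Int × String) : Prop := out = parse_problem_right_to_left_alt grid start_col end_col
instance (grid : List String) (start_col : Int) (end_col : Int) (out : List Int × String) : Decidable (Spec_parse_problem_right_to_left grid start_col end_col out) := by unfold Spec_parse_problem_right_to_left; infer_instance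

-- ===== CLAIM (what is proved, stated in full; the proofs are below) =====
def Claim_equal_parse_problem_right_to_left : Prop := ∀ (grid : List String) (start_col : Int) (end_col : Int), Dom_parse_problem_right_to_left grid start_col end_col → Pre_parse_problem_right_to_left grid start_col end_col → Spec_parse_problem_right_to_left grid start_col end_col (parse_problem_right_to_left grid start_col end_col)

-- ===== LEMMAS AND PROOFS =====

-- the character both ports read at (row, col), in the total form both use
def pvCell (grid : List String) (row col : Int) : Char :=
  PySem.List.pyGetD (PySem.List.pyGetD grid row "").toList col ' '

-- filterMap of an if-some-else-none is the map of the filter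
theorem pv_filterMap_ite {α β : Type} (l : List α) (p : α → Prop) [DecidablePred p] (f : α → β) :
    l.filterMap (fun x => if p x then some (f x) else none)
      = (l.filter (fun x => decide (p x))).map f := by
  induction l with
  | nil => rfl
  | cons a t ih => by_cases h : p a <;> simp [h, ih]

theorem pv_flatMap_ite {α β : Type} (l : List α) (p : α → Prop) [DecidablePred p] (f : α → β) :
    l.flatMap (fun x => if p x then [f x] else []) = (l.filter (fun x => decide (p x))).map f := by
  induction l with
  | nil => rfl
  | cons a t ih => by_cases h : p a <;> simp [List.flatMap_cons, h, ih]

-- A's append-or-skip fold is a filterMap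
theorem pv_foldl_opt {α : Type} (l : List α) (f : α → Option Int) (acc : List Int) :
    l.foldl (fun ns x => match f x with | some n => ns ++ [n] | none => ns) acc
      = acc ++ l.filterMap f := by
  induction l generalizing acc with
  | nil => simp
  | cons a t ih => cases h : f a <;> simp [h, ih]

-- B's grouped column equals A's column-major digit collection (cols with no duplicate column)
theorem pv_chars_eq (grid : List String) (cols rows : List Int) (hnd : cols.Nodup) (col : Int) (hcol : col ∈ cols) :
    PySem.Dict.getD
      ((rows.flatMap (fun row => cols.filterMap (fun c =>
          if pvCell grid row c ≠ ' ' then some (c, pvCell grid row c) else none))).foldl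
        (fun d p => PySem.Dict.modify d p.1 [] (fun l => l ++ [p.2])) PySem.Dict.empty) col []
      = rows.foldl (fun dc row => if pvCell grid row col ≠ ' ' then dc ++ [pvCell grid row col] else dc) [] := by
  rw [PySem.Dict.getD_foldl_modify_append]
  simp only [fun row => pv_filterMap_ite cols (fun c => pvCell grid row c ≠ ' ')
    (fun c => (c, pvCell grid row c))]
  rw [List.filter_flatMap, List.map_flatMap]
  have hper : ∀ row : Int,
      (((cols.filter (fun c => decide (pvCell grid row c ≠ ' '))).map (fun c => (c, pvCell grid row c))).filter
          (fun p => p.1 == col)).map Prod.snd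
        = if pvCell grid row col ≠ ' ' then [pvCell grid row col] else [] := by
    intro row
    rw [List.filter_map]
    have : ((fun p : Int × Char => p.1 == col) ∘ fun c => (c, pvCell grid row c)) = fun c => c == col := rfl
    rw [this, List.filter_comm, List.filter_beq, List.count_eq_one_of_mem hnd hcol]
    by_cases h : pvCell grid row col ≠ ' ' <;> simp [h]
  simp only [hper]
  rw [pv_flatMap_ite rows (fun row => pvCell grid row col ≠ ' ') (fun row => pvCell grid row col)]
  rw [PySem.List.foldl_append_ite (p := fun row => pvCell grid row col ≠ ' ') (f := fun row => pvCell grid row col) (l := rows) (acc := [])]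
  simp

-- the two numbers lists agree (stated over pvCell; definitionally the ports' computations)
theorem pv_numbers_eq (grid : List String) (s e : Int) :
    (PySem.List.pyRange e (s - 1) (-1)).foldl (fun ns col =>
        let dc := (PySem.List.pyRange 0 ((grid.length : Int) - 1) 1).foldl (fun dc row =>
            if pvCell grid row col ≠ ' ' then dc ++ [pvCell grid row col] else dc) []
        if dc ≠ [] then match PySem.Int.ofChars? dc with | some n => ns ++ [n] | none => ns else ns) []
      = (PySem.List.pyRange s (e + 1) 1).reverse.filterMap (fun col =>
          PySem.Int.ofChars? (PySem.Dict.getD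
            (((PySem.List.pyRange 0 ((grid.length : Int) - 1) 1).flatMap (fun row =>
                (PySem.List.pyRange s (e + 1) 1).filterMap (fun c =>
                  if pvCell grid row c ≠ ' ' then some (c, pvCell grid row c) else none))).foldl
              (fun d p => PySem.Dict.modify d p.1 [] (fun l => l ++ [p.2])) PySem.Dict.empty) col [])) := by
  have hrev : PySem.List.pyRange e (s - 1) (-1) = (PySem.List.pyRange s (e + 1) 1).reverse := by
    have h := PySem.List.pyRange_neg_one_eq_reverse e (s - 1)
    have h2 : s - 1 + 1 = s := by ring
    rw [h2] at h
    exact h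
  rw [hrev]
  have hguard : ∀ (ns : List Int) (col : Int), col ∈ (PySem.List.pyRange s (e + 1) 1).reverse →
      (let dc := (PySem.List.pyRange 0 ((grid.length : Int) - 1) 1).foldl (fun dc row =>
            if pvCell grid row col ≠ ' ' then dc ++ [pvCell grid row col] else dc) []
       if dc ≠ [] then match PySem.Int.ofChars? dc with | some n => ns ++ [n] | none => ns else ns)
      = (match PySem.Int.ofChars? (PySem.Dict.getD
            (((PySem.List.pyRange 0 ((grid.length : Int) - 1) 1).flatMap (fun row =>
                (PySem.List.pyRange s (e + 1) 1).filterMap (fun c =>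
                  if pvCell grid row c ≠ ' ' then some (c, pvCell grid row c) else none))).foldl
              (fun d p => PySem.Dict.modify d p.1 [] (fun l => l ++ [p.2])) PySem.Dict.empty) col []) with
         | some n => ns ++ [n] | none => ns) := by
    intro ns col hm
    rw [pv_chars_eq grid _ _ (PySem.List.nodup_pyRange_one s (e + 1)) col (List.mem_reverse.mp hm)]
    show (if _ ≠ ([] : List Char) then _ else ns) = _
    by_cases h : ((PySem.List.pyRange 0 ((grid.length : Int) - 1) 1).foldl (fun dc row =>
        if pvCell grid row col ≠ ' ' then dc ++ [pvCell grid row col] else dc) []) = []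
    · rw [h]; rfl
    · rw [if_pos h]
  have h1 := PySem.List.foldl_congr_mem
    (l := (PySem.List.pyRange s (e + 1) 1).reverse) (init := ([] : List Int))
    (f := fun ns col =>
        let dc := (PySem.List.pyRange 0 ((grid.length : Int) - 1) 1).foldl (fun dc row =>
            if pvCell grid row col ≠ ' ' then dc ++ [pvCell grid row col] else dc) []
        if dc ≠ [] then match PySem.Int.ofChars? dc with | some n => ns ++ [n] | none => ns else ns)
    (g := fun ns col =>
        match PySem.Int.ofChars? (PySem.Dict.getD
            (((PySem.List.pyRange 0 ((grid.length : Int) - 1) 1).flatMap (fun row =>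
                (PySem.List.pyRange s (e + 1) 1).filterMap (fun c =>
                  if pvCell grid row c ≠ ' ' then some (c, pvCell grid row c) else none))).foldl
              (fun d p => PySem.Dict.modify d p.1 [] (fun l => l ++ [p.2])) PySem.Dict.empty) col []) with
        | some n => ns ++ [n] | none => ns)
    (fun ns col hm => hguard ns col hm)
  rw [h1]
  simpa using pv_foldl_opt ((PySem.List.pyRange s (e + 1) 1).reverse) _ []

-- A's break loop over the last row equals B's find-first over the mapped cells
theorem pv_op_eq (grid : List String) (cs : List Int) :
    pvOpScanA grid cs
      = (match (cs.map (fun col => pvCell grid ((grid.length : Int) - 1) col)).find?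
            (fun c => c == '+' || c == '*') with
         | some c => String.ofList [c]
         | none => " ") := by
  induction cs with
  | nil => rfl
  | cons col rest ih =>
    by_cases h : pvCell grid ((grid.length : Int) - 1) col = '+' ∨ pvCell grid ((grid.length : Int) - 1) col = '*'
    · have hb : (pvCell grid ((grid.length : Int) - 1) col == '+' || pvCell grid ((grid.length : Int) - 1) col == '*') = true := by
        rcases h with h | h <;> simp [h]
      have h' := h; simp only [pvCell] at h'
      simp only [List.map_cons, List.find?_cons, hb]
      show (if _ then _ else _) = _
      rw [if_pos h']; rfl
    · have hb : (pvCell grid ((grid.length : Int) - 1) col == '+' || pvCell grid ((grid.length : Int) - 1) col == '*') = false := by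
        rw [not_or] at h
        simp [h.1, h.2]
      have h' := h; simp only [pvCell] at h'
      simp only [List.map_cons, List.find?_cons, hb]
      show (if _ then _ else _) = _
      rw [if_neg h', ih]

-- ===== VERDICT (by name: the statement is the Claim_ definition above) =====
theorem parse_problem_right_to_left_spec : Claim_equal_parse_problem_right_to_left := by
  intro grid s e _ _
  unfold Spec_parse_problem_right_to_left
  simp only [parse_problem_right_to_left, parse_problem_right_to_left_alt, Prod.mk.injEq]
  exact ⟨pv_numbers_eq grid s e, pv_op_eq grid _⟩
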